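-- pv_equiv track=rewrite | github.com/dotancohen/voice | src/ui/tag_management_dialog.py | _highlight_text
-- ===== SOURCE A (Python) =====
-- def _highlight_text(text: str, highlight: str) -> str:
--     """Return HTML with highlighted substring."""
--     if not highlight:
--         return text
--
--     lower_text = text.lower()
--     lower_highlight = highlight.lower()
--     result = []
--     current_index = 0
--
--     while current_index < len(text):
--         match_index = lower_text.find(lower_highlight, current_index)
--         if match_index == -1:
--             result.append(text[current_index:])
--             break
--
--         if match_index > current_index:
--             result.append(text[current_index:match_index])
--
--         match_end = match_index + len(highlight)
--         result.append(f"<b style='background-color: #ffff00;'>{text[match_index:match_end]}</b>")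
--         current_index = match_end
--
--     return "".join(result)
-- ===== SOURCE B (Python) =====
-- def _highlight_text(text: str, highlight: str) -> str:
--     """Return HTML with highlighted substring."""
--     if not highlight:
--         return text
--
--     lower_text = text.lower()
--     lower_highlight = highlight.lower()
--     m = len(highlight)
--     parts = []
--     i = 0
--     while i < len(text):
--         if lower_text[i:i + m] == lower_highlight:
--             parts.append(f"<b style='background-color: #ffff00;'>{text[i:i + m]}</b>")
--             i += m
--         else:
--             parts.append(text[i])
--             i += 1
--     return "".join(parts)
-- ===== Notes on version B (the rewrite author's own statement) =====
-- stated objective: simpler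
-- what changed: Replaces the find()-driven loop with its gap slicing, break and -1 sentinel by a single cursor scan that tests a fixed-width lowercased window at each position, emitting either the wrapped match or one character.
import Mathlib
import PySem

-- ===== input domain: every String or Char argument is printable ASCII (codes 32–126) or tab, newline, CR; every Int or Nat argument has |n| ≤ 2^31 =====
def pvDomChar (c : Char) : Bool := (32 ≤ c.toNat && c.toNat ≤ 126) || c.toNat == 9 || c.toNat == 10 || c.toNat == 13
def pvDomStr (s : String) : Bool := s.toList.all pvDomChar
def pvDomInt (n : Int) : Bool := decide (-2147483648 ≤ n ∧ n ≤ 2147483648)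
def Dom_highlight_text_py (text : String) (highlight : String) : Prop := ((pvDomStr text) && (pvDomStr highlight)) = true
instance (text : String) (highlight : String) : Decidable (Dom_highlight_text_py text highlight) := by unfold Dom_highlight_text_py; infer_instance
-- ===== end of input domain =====

-- B replaces A's find()-driven loop (gap slices, -1 sentinel, break) by a single cursor scan
-- that tests a fixed-width lowercased window at each position (objective: simpler; same output).

def pvTagOpen : List Char := "<b style='background-color: #ffff00;'>".toList
def pvTagClose : List Char := "</b>".toList

theorem pvLowerLen (cs : List Char) : (PySem.Chars.lower cs).length = cs.length := by
  simp [PySem.Chars.lower]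

-- ===== PORT A =====
-- the while-loop of A, on code points; hm/hlen are termination facts only
def pvALoop (t lt lh : List Char) (m : Nat) (hm : 0 < m) (hlen : t.length ≤ lt.length)
    (i : Nat) : List Char :=
  if h : i < t.length then
    let mi := PySem.Chars.findFrom lt lh (i : Int) none
    if hmi : mi = -1 then
      PySem.List.slice t (some (i : Int)) none
    else
      (if (i : Int) < mi then PySem.List.slice t (some (i : Int)) (some mi) else []) ++
      pvTagOpen ++ PySem.List.slice t (some mi) (some (mi + (m : Int))) ++ pvTagClose ++
      pvALoop t lt lh m hm hlen (mi + (m : Int)).toNat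
  else []
termination_by t.length - i
decreasing_by
  have hk : i ≤ lt.length := le_trans (le_of_lt h) hlen
  have hs := (PySem.Chars.findFrom_natCast_spec lt lh i hk hmi).1
  omega

def highlight_text_py (text : String) (highlight : String) : String :=
  if hh : highlight.toList = [] then text
  else
    String.ofList (pvALoop text.toList (PySem.Chars.lower text.toList)
      (PySem.Chars.lower highlight.toList) highlight.toList.length
      (List.length_pos_iff.mpr hh)
      (by rw [pvLowerLen]) 0)

-- ===== PORT B =====
-- the while-loop of B: at each cursor position compare the lowered window of width m
def pvBLoop (t lt lh : List Char) (m : Nat) (hm : 0 < m) (i : Nat) : List Char :=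
  if h : i < t.length then
    if PySem.List.slice lt (some (i : Int)) (some ((i + m : Nat) : Int)) = lh then
      pvTagOpen ++ PySem.List.slice t (some (i : Int)) (some ((i + m : Nat) : Int)) ++ pvTagClose ++
      pvBLoop t lt lh m hm (i + m)
    else t[i] :: pvBLoop t lt lh m hm (i + 1)
  else []
termination_by t.length - i
decreasing_by all_goals omega

def highlight_text_py_alt (text : String) (highlight : String) : String :=
  if hh : highlight.toList = [] then text
  else
    String.ofList (pvBLoop text.toList (PySem.Chars.lower text.toList)
      (PySem.Chars.lower highlight.toList) highlight.toList.length
      (List.length_pos_iff.mpr hh) 0)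

-- ===== PRECONDITION & SPEC =====
def Spec_highlight_text_py (text : String) (highlight : String) (out : String) : Prop := out = highlight_text_py_alt text highlight
instance (text : String) (highlight : String) (out : String) : Decidable (Spec_highlight_text_py text highlight out) := by unfold Spec_highlight_text_py; infer_instance

-- ===== CLAIM (what is proved, stated in full; the proofs are below) =====
def Claim_equal_highlight_text_py : Prop := ∀ (text : String) (highlight : String), Dom_highlight_text_py text highlight → Spec_highlight_text_py text highlight (highlight_text_py text highlight)

-- ===== LEMMAS AND PROOFS =====

-- the window test of B is exactly "lh is a prefix of lt.drop i" (when lh has length m)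
theorem pvWindow_iff (lt lh : List Char) (m i : Nat) (hlh : lh.length = m) :
    PySem.List.slice lt (some (i : Int)) (some ((i + m : Nat) : Int)) = lh ↔ lh <+: lt.drop i := by
  have : ((i + m : Nat) : Int) = (i : Int) + (m : Int) := by push_cast; ring
  rw [this, PySem.List.slice_natCast_add, List.prefix_iff_eq_take, hlh, eq_comm]

theorem pvPrefix_drop_of_ge (lt lh : List Char) (i j : Nat) (hij : i ≤ j)
    (h : lh <+: lt.drop j) : lh <:+: lt.drop i := by
  have : lt.drop j = (lt.drop i).drop (j - i) := by rw [List.drop_drop]; congr 1; omega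
  rw [this] at h
  exact h.isInfix.trans (List.drop_suffix _ _).isInfix

-- B emits the text verbatim over a match-free region
theorem pvBLoop_noMatch (t lt lh : List Char) (m : Nat) (hm : 0 < m) (hlh : lh.length = m)
    (i : Nat) (hno : ∀ j, i ≤ j → ¬ lh <+: lt.drop j) :
    pvBLoop t lt lh m hm i = t.drop i := by
  have H : ∀ n i, t.length - i ≤ n → (∀ j, i ≤ j → ¬ lh <+: lt.drop j) →
      pvBLoop t lt lh m hm i = t.drop i := by
    intro n
    induction n with
    | zero =>
      intro i hn _
      rw [pvBLoop, dif_neg (by omega)]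
      exact (List.drop_eq_nil_of_le (by omega)).symm
    | succ n ih =>
      intro i hn hno
      rw [pvBLoop]
      split
      · rename_i h
        rw [if_neg (fun hc => hno i le_rfl ((pvWindow_iff lt lh m i hlh).mp hc))]
        rw [ih (i + 1) (by omega) (fun j hj => hno j (by omega))]
        exact (List.drop_eq_getElem_cons h).symm
      · rename_i h
        exact (List.drop_eq_nil_of_le (by omega)).symm
  exact H (t.length - i) i le_rfl hno

-- B walks a match-free gap [i, k) character by character
theorem pvBLoop_gap (t lt lh : List Char) (m : Nat) (hm : 0 < m) (hlh : lh.length = m)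
    (i k : Nat) (hik : i ≤ k) (hk : k ≤ t.length)
    (hno : ∀ j, i ≤ j → j < k → ¬ lh <+: lt.drop j) :
    pvBLoop t lt lh m hm i = (t.drop i).take (k - i) ++ pvBLoop t lt lh m hm k := by
  have H : ∀ n i, k - i ≤ n → i ≤ k → (∀ j, i ≤ j → j < k → ¬ lh <+: lt.drop j) →
      pvBLoop t lt lh m hm i = (t.drop i).take (k - i) ++ pvBLoop t lt lh m hm k := by
    intro n
    induction n with
    | zero =>
      intro i hn hik _
      have : i = k := by omega
      simp [this]
    | succ n ih =>
      intro i hn hik hno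
      rcases Nat.eq_or_lt_of_le hik with rfl | hlt
      · simp
      · have hi : i < t.length := by omega
        rw [pvBLoop, dif_pos hi,
          if_neg (fun hc => hno i le_rfl hlt ((pvWindow_iff lt lh m i hlh).mp hc)),
          ih (i + 1) (by omega) (by omega) (fun j hj hj' => hno j (by omega) hj')]
        rw [List.drop_eq_getElem_cons hi]
        have : k - i = (k - (i + 1)) + 1 := by omega
        rw [this, List.take_succ_cons, List.cons_append]
  exact H (k - i) i le_rfl hik hno

theorem pvLoop_eq (t lt lh : List Char) (m : Nat) (hm : 0 < m) (hlh : lh.length = m)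
    (hlt : lt.length = t.length) (hlen : t.length ≤ lt.length) (i : Nat) :
    pvALoop t lt lh m hm hlen i = pvBLoop t lt lh m hm i := by
  have H : ∀ n i, t.length - i ≤ n → pvALoop t lt lh m hm hlen i = pvBLoop t lt lh m hm i := by
    intro n
    induction n with
    | zero =>
      intro i hn
      rw [pvALoop, dif_neg (by omega), pvBLoop, dif_neg (by omega)]
    | succ n ihn =>
      intro i hn
      rw [pvALoop]
      split
      · rename_i h
        have hk : i ≤ lt.length := by omega
        dsimp only
        split
        · rename_i hmi
          -- no match anywhere from i on
          have hinf : ¬ lh <:+: lt.drop i :=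
            (PySem.Chars.findFrom_natCast_eq_neg_one_iff lt lh i hk).mp hmi
          rw [pvBLoop_noMatch t lt lh m hm hlh i
            (fun j hj hp => hinf (pvPrefix_drop_of_ge lt lh i j hj hp))]
          exact PySem.List.slice_from_natCast t i
        · rename_i hmi
          obtain ⟨h1, h2, h3⟩ := PySem.Chars.findFrom_natCast_spec lt lh i hk hmi
          set mi := PySem.Chars.findFrom lt lh (i : Int) none with hmidef
          have hmi0 : 0 ≤ mi := le_trans (by omega) h1
          set k := mi.toNat with hkdef
          have hmik : mi = (k : Int) := by omega
          have hik : i ≤ k := by omega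
          have hlh0 : lh ≠ [] := by intro hc; rw [hc] at hlh; simp at hlh; omega
          have hkt : k < t.length := by
            by_contra hc
            have : lt.drop k = [] := List.drop_eq_nil_of_le (by omega)
            rw [this, List.prefix_nil] at h2
            exact hlh0 h2
          -- B side: gap then the match
          rw [pvBLoop_gap t lt lh m hm hlh i k hik (by omega) h3]
          rw [pvBLoop, dif_pos hkt, if_pos ((pvWindow_iff lt lh m k hlh).mpr h2)]
          -- A side: normalize the slices
          have hgap : (if (i : Int) < mi then PySem.List.slice t (some (i : Int)) (some mi) else [])
              = (t.drop i).take (k - i) := by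
            rw [hmik]
            split
            · exact PySem.List.slice_natCast t i k
            · have : k = i := by omega
              simp [this]
          have hmatch : PySem.List.slice t (some mi) (some (mi + (m : Int)))
              = PySem.List.slice t (some (k : Int)) (some ((k + m : Nat) : Int)) := by
            rw [hmik]; push_cast; rfl
          have htoNat : (mi + (m : Int)).toNat = k + m := by omega
          rw [hgap, hmatch, htoNat, ihn (k + m) (by omega)]
          simp [List.append_assoc]
      · rename_i h
        rw [pvBLoop, dif_neg h]
  exact H (t.length - i) i le_rfl

-- ===== VERDICT (by name: the statement is the Claim_ definition above) =====
theorem highlight_text_py_spec : Claim_equal_highlight_text_py := by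
  intro text highlight _
  unfold Spec_highlight_text_py highlight_text_py highlight_text_py_alt
  split
  · rfl
  · rename_i hh
    rw [pvLoop_eq _ _ _ _ _ (pvLowerLen _) (pvLowerLen _) _ 0]
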